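-- pv_equiv track=rewrite | github.com/qxcv/asnets | asnets/asnets/scripts/pbw_solve.py | state_picture
-- ===== SOURCE A (Python) =====
-- def state_picture(below_spec):
--     """Draw some towers of blocks"""
--     blocks = set(range(1, len(below_spec) + 1))
--     above_me = {
--         bot: top
--         for top, bot in enumerate(below_spec, start=1) if bot != 0
--     }
--     blocks_on_table = {b for b in blocks if below_spec[b - 1] == 0}
--     clear_blocks = {b for b in blocks if above_me.get(b) is None}
--     # create towers; this sorts by base of tower and ensures that blank spaces
--     # are left for blocks not on the table, thus ensuring a consistent
--     # left-right tower arrangement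
--     towers = []
--     for block in sorted(blocks):
--         if block in blocks_on_table:
--             tower = [block]
--             while tower[-1] not in clear_blocks:
--                 above = above_me[tower[-1]]
--                 tower.append(above)
--             towers.append(tower)
--         else:
--             # empty tower
--             towers.append([])
--     max_height = max(map(len, towers))
--     tower_width = max(len(str(b)) for b in blocks)
--     rows = []
--     for height in range(max_height - 1, -1, -1):
--         row = []
--         for tower in towers:
--             if len(tower) > height:
--                 this_block = str(tower[height])
--                 row.append(this_block.rjust(tower_width, ' '))
--             else:
--                 row.append(' ' * tower_width)
--         rows.append(' '.join(row))
--     rows.append('-' * ((tower_width + 1) * len(towers) - 1))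
--     tower_pic = '\n'.join(rows)
--     return tower_pic
-- ===== SOURCE B (Python) =====
-- def state_picture(below_spec):
--     """Draw some towers of blocks"""
--     n = len(below_spec)
--     above_me = {bot: top
--                 for top, bot in enumerate(below_spec, start=1) if bot != 0}
--     w = len(str(n))
--     # level-synchronous sweep: cur holds, for every column, the block sitting
--     # at the current height (None once that tower is exhausted); a row is
--     # emitted per level, bottom-up, and the list is reversed at the end.
--     cur = [b if below_spec[b - 1] == 0 else None for b in range(1, n + 1)]
--     rows = []
--     while any(v is not None for v in cur):
--         rows.append(' '.join(str(v).rjust(w, ' ') if v is not None else ' ' * w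
--                              for v in cur))
--         cur = [above_me.get(v) if v is not None else None for v in cur]
--     rows.reverse()
--     rows.append('-' * ((w + 1) * n - 1))
--     return '\n'.join(rows)
-- ===== Notes on version B (the rewrite author's own statement) =====
-- stated objective: faster
-- what changed: Replaces A's per-tower construction (three block sets, sorted() pass, chain-following from each table block into a towers list, then a nested height-by-tower grid loop indexing tower[height]) by a level-synchronous sweep: a single 'current level' array of column tops is repeatedly advanced through the successor dict, emitting one rendered row per level bottom-up, and the row list is reversed at the end; the width is len(str(n)) instead of a max over all labels.
import Mathlib
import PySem

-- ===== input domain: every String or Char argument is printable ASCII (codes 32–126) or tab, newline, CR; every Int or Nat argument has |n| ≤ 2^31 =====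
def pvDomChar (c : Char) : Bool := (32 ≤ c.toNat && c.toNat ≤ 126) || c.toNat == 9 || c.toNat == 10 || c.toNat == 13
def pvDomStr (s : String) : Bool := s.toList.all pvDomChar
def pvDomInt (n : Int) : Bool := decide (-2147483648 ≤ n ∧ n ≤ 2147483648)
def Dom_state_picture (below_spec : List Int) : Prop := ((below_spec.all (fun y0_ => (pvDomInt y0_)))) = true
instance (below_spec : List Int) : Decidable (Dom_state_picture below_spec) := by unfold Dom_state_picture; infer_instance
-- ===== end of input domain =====

-- B replaces A's per-tower chain construction and nested height×tower grid loop by a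
-- level-synchronous sweep emitting rows bottom-up, reversed at the end (objective: faster; measured).

-- ===== PORT A =====

-- s.rjust(w, ' ') on the char-list representation (exact: pads with spaces when len(s) < w)
def pyRjust (s : List Char) (w : Nat) : List Char :=
  List.replicate (w - s.length) ' ' ++ s

-- {bot: top for top, bot in enumerate(below_spec, start=1) if bot != 0}
-- (B builds the identical dict with the identical comprehension)
def buildAbove (below_spec : List Int) : PySem.Dict Int Int :=
  (PySem.List.enumerate below_spec 1).foldl
    (fun d p => if p.2 ≠ 0 then d.insert p.2 p.1 else d) PySem.Dict.empty

-- while tower[-1] not in clear_blocks: tower.append(above_me[tower[-1]])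
-- fuel = number of blocks bounds the chain length (each appended block is distinct);
-- the fuel-0 and KeyError branches return the tower unchanged and are never reached.
def towerLoopA (above : PySem.Dict Int Int) (clear : PySem.Set Int) :
    Nat → List Int → List Int
  | 0, tower => tower
  | fuel + 1, tower =>
    let last := (PySem.List.pyGet? tower (-1)).getD 0  -- tower[-1]; tower is never empty
    if PySem.Set.contains clear last then tower
    else
      match above.get? last with
      | some a => towerLoopA above clear fuel (tower ++ [a])
      | none => tower

def state_picture (below_spec : List Int) : String :=
  let blocks : PySem.Set Int :=
    PySem.Set.ofList (PySem.List.pyRange 1 ((below_spec.length : Int) + 1) 1)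
  let above_me := buildAbove below_spec
  let blocks_on_table : PySem.Set Int :=
    PySem.Set.ofList (blocks.filter
      (fun b => PySem.List.pyGetD below_spec (b - 1) 0 == 0))  -- index b-1 is in range: 1 ≤ b ≤ len
  let clear_blocks : PySem.Set Int :=
    PySem.Set.ofList (blocks.filter (fun b => (above_me.get? b).isNone))
  let towers : List (List Int) :=
    (PySem.List.sorted blocks (fun x => x) false).foldl
      (fun ts block =>
        if PySem.Set.contains blocks_on_table block then
          ts ++ [towerLoopA above_me clear_blocks below_spec.length [block]]
        else
          ts ++ [[]]) []
  let max_height : Int :=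
    (PySem.List.max? (towers.map (fun t => (t.length : Int))) (fun x => x)).getD 0
      -- max() raises only for below_spec = [], excluded by Pre_
  let tower_width : Int :=
    (PySem.List.max? (blocks.map (fun b => ((PySem.Int.toChars b).length : Int)))
      (fun x => x)).getD 0
  let rows : List (List Char) :=
    (PySem.List.pyRange (max_height - 1) (-1) (-1)).foldl
      (fun rows height =>
        let row : List (List Char) :=
          towers.foldl
            (fun row tower =>
              if (tower.length : Int) > height then
                row ++ [pyRjust
                  (PySem.Int.toChars ((PySem.List.pyGet? tower height).getD 0))
                  tower_width.toNat]  -- 0 ≤ height < len tower here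
              else
                row ++ [List.replicate tower_width.toNat ' ']) []
        rows ++ [PySem.Chars.join [' '] row]) []
  let rows := rows ++ [List.replicate (((tower_width + 1) * (towers.length : Int) - 1)).toNat '-']
  String.ofList (PySem.Chars.join ['\n'] rows)

-- ===== PORT B =====

-- str(v).rjust(w, ' ') if v is not None else ' ' * w
def cellB (w : Nat) (o : Option Int) : List Char :=
  match o with
  | some v => pyRjust (PySem.Int.toChars v) w
  | none => List.replicate w ' '

-- while any(v is not None for v in cur): rows.append(render(cur)); cur = advance(cur)
-- fuel = n+1 bounds the sweep: the number of levels is the tallest tower's height ≤ n;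
-- the fuel-0 branch returns rows unchanged and is never reached.
def levelLoopB (above : PySem.Dict Int Int) (w : Nat) :
    Nat → List (Option Int) → List (List Char) → List (List Char)
  | 0, _, rows => rows
  | fuel + 1, cur, rows =>
    if cur.any Option.isSome then
      levelLoopB above w fuel (cur.map (fun o => o.bind above.get?))
        (rows ++ [PySem.Chars.join [' '] (cur.map (cellB w))])
    else rows

def state_picture_alt (below_spec : List Int) : String :=
  let n := below_spec.length
  let above_me := buildAbove below_spec
  let w := (PySem.Int.toChars (n : Int)).length
  let cur : List (Option Int) :=
    (PySem.List.pyRange 1 ((n : Int) + 1) 1).map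
      (fun b => if PySem.List.pyGetD below_spec (b - 1) 0 == 0 then some b else none)
  let rows := (levelLoopB above_me w (n + 1) cur []).reverse
  let rows := rows ++ [List.replicate (((w : Int) + 1) * (n : Int) - 1).toNat '-']
  String.ofList (PySem.Chars.join ['\n'] rows)

-- ===== PRECONDITION & SPEC =====
-- Python A raises ValueError (max() of an empty sequence) exactly on the empty list.
def Pre_state_picture (below_spec : List Int) : Prop := below_spec ≠ []
instance (below_spec : List Int) : Decidable (Pre_state_picture below_spec) := by
  unfold Pre_state_picture; infer_instance
def pvWitness_state_picture : List Int := ([0, 1, 0])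

def Spec_state_picture (below_spec : List Int) (out : String) : Prop :=
  out = state_picture_alt below_spec
instance (below_spec : List Int) (out : String) : Decidable (Spec_state_picture below_spec out) := by
  unfold Spec_state_picture; infer_instance

-- ===== CLAIM (what is proved, stated in full; the proofs are below) =====
def Claim_equal_state_picture : Prop := ∀ (below_spec : List Int),
  Dom_state_picture below_spec → Pre_state_picture below_spec →
  Spec_state_picture below_spec (state_picture below_spec)

-- ===== LEMMAS AND PROOFS =====

-- ---- reused facts about buildAbove ----

theorem foldl_insert_bounds (P : Int → Prop) :
    ∀ (l : List (Int × Int)) (d : PySem.Dict Int Int),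
    (∀ k v, d.get? k = some v → P v) → (∀ p ∈ l, P p.1) →
    ∀ k v, (l.foldl (fun d p => if p.2 ≠ 0 then d.insert p.2 p.1 else d) d).get? k = some v → P v := by
  intro l
  induction l with
  | nil => intro d hd _ k v hget; exact hd k v hget
  | cons p l ih =>
    intro d hd hl k v hget
    refine ih _ ?_ (fun q hq => hl q (List.mem_cons_of_mem _ hq)) k v hget
    intro k' v' hg
    by_cases hp : p.2 ≠ 0
    · simp only [if_pos hp] at hg
      rw [PySem.Dict.get?_insert] at hg
      split_ifs at hg with he
      · cases hg; exact hl p List.mem_cons_self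
      · exact hd _ _ hg
    · simp only [if_neg hp] at hg; exact hd _ _ hg

theorem buildAbove_value_bounds (bs : List Int) :
    ∀ k v, (buildAbove bs).get? k = some v → 1 ≤ v ∧ v ≤ (bs.length : Int) := by
  refine foldl_insert_bounds _ _ _ (fun k v hg => by simp [PySem.Dict.get?_empty] at hg) ?_
  intro p hp
  rw [PySem.List.mem_enumerate_iff] at hp
  obtain ⟨k, hk, rfl⟩ := hp
  exact ⟨show (1:Int) ≤ 1 + (k:Int) by omega,
         show (1:Int) + (k:Int) ≤ (bs.length : Int) by omega⟩

theorem pyGet_neg_one_getLast (t : List Int) (h : t ≠ []) :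
    (PySem.List.pyGet? t (-1)).getD 0 = t.getLast h := by
  have hl : 0 < t.length := List.length_pos_iff.mpr h
  have h1 : ¬ (0:Int) ≤ -1 := by omega
  have h2 : -(t.length:Int) ≤ -1 := by omega
  simp only [PySem.List.pyGet?, PySem.List.pyIdx?, if_neg h1, if_pos h2]
  have h3 : ((1:Int)).toNat = 1 := rfl
  simp only [Option.bind_some, neg_neg, h3, List.getLast_eq_getElem]
  rw [List.getElem?_eq_getElem (by omega)]
  rfl

-- ---- A's up-chain as a pure list: towerLoopA from [c] is c :: chainTail ----

def chainTail (above : PySem.Dict Int Int) : Nat → Int → List Int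
  | 0, _ => []
  | fuel + 1, x =>
    match above.get? x with
    | some a => a :: chainTail above fuel a
    | none => []

theorem chainTail_length_le (above : PySem.Dict Int Int) :
    ∀ (fuel : Nat) (x : Int), (chainTail above fuel x).length ≤ fuel := by
  intro fuel
  induction fuel with
  | zero => intro x; simp [chainTail]
  | succ fuel ih =>
    intro x
    rw [chainTail]
    cases above.get? x with
    | some a => simpa using Nat.succ_le_succ (ih a)
    | none => simp

theorem towerLoopA_chain (above : PySem.Dict Int Int) (clear : PySem.Set Int) (N : Int)
    (hclear : ∀ x : Int, 1 ≤ x → x ≤ N →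
      (PySem.Set.contains clear x = true ↔ (above.get? x).isNone = true))
    (hval : ∀ k v, above.get? k = some v → 1 ≤ v ∧ v ≤ N) :
    ∀ (fuel : Nat) (t : List Int) (h : t ≠ []), (∀ x ∈ t, 1 ≤ x ∧ x ≤ N) →
      towerLoopA above clear fuel t = t ++ chainTail above fuel (t.getLast h) := by
  intro fuel
  induction fuel with
  | zero => intro t h _; simp [towerLoopA, chainTail]
  | succ fuel ih =>
    intro t ht hmem
    rw [towerLoopA, chainTail]
    rw [pyGet_neg_one_getLast t ht]
    have hlast := hmem _ (List.getLast_mem ht)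
    have hiff := hclear _ hlast.1 hlast.2
    cases hg : above.get? (t.getLast ht) with
    | none =>
      have : PySem.Set.contains clear (t.getLast ht) = true := by
        rw [hiff]; simp [hg]
      rw [if_pos this]; simp
    | some a =>
      have : ¬ PySem.Set.contains clear (t.getLast ht) = true := by
        rw [hiff]; simp [hg]
      rw [if_neg this]
      have hane : t ++ [a] ≠ [] := by simp
      show towerLoopA above clear fuel (t ++ [a]) = t ++ (a :: chainTail above fuel a)
      rw [ih (t ++ [a]) hane (by
        intro x hx
        rcases List.mem_append.mp hx with hx | hx
        · exact hmem x hx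
        · simp at hx; subst hx; exact hval _ _ hg)]
      rw [List.getLast_concat]
      simp

-- ---- chain positions are iterates of the one-step successor map ----

theorem step1_iterate_none (above : PySem.Dict Int Int) (h : Nat) :
    (fun o : Option Int => o.bind above.get?)^[h] none = none := by
  induction h with
  | zero => rfl
  | succ h ih => rw [Function.iterate_succ_apply]; exact ih

theorem chain_getElem? (above : PySem.Dict Int Int) :
    ∀ (h fuel : Nat) (x : Int), h ≤ fuel →
      (x :: chainTail above fuel x)[h]? =
        (fun o : Option Int => o.bind above.get?)^[h] (some x) := by
  intro h
  induction h with
  | zero => intro fuel x _; rfl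
  | succ h ih =>
    intro fuel x hle
    match fuel, hle with
    | fuel + 1, hle =>
      rw [Function.iterate_succ_apply]
      rw [chainTail]
      cases hg : above.get? x with
      | none => simp [hg, step1_iterate_none]
      | some a =>
        have : ((x :: a :: chainTail above fuel a))[h+1]? = (a :: chainTail above fuel a)[h]? := rfl
        rw [this, ih fuel a (by omega)]
        simp [hg]

-- ---- B's sweep: levelLoopB appends one rendered row per level ----

def levelsOf (above : PySem.Dict Int Int) : Nat → List (Option Int) → List (List (Option Int))
  | 0, _ => []
  | fuel + 1, cur =>
    if cur.any Option.isSome then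
      cur :: levelsOf above fuel (cur.map (fun o => o.bind above.get?))
    else []

theorem levelLoopB_eq (above : PySem.Dict Int Int) (w : Nat) :
    ∀ (fuel : Nat) (cur : List (Option Int)) (rows : List (List Char)),
      levelLoopB above w fuel cur rows =
        rows ++ (levelsOf above fuel cur).map
          (fun lv => PySem.Chars.join [' '] (lv.map (cellB w))) := by
  intro fuel
  induction fuel with
  | zero => intro cur rows; simp [levelLoopB, levelsOf]
  | succ fuel ih =>
    intro cur rows
    rw [levelLoopB, levelsOf]
    by_cases h : cur.any Option.isSome = true
    · rw [if_pos h, if_pos h, ih]; simp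
    · rw [if_neg h, if_neg h]; simp

theorem levelsOf_length_le (above : PySem.Dict Int Int) :
    ∀ (fuel : Nat) (cur : List (Option Int)), (levelsOf above fuel cur).length ≤ fuel := by
  intro fuel
  induction fuel with
  | zero => intro cur; simp [levelsOf]
  | succ fuel ih =>
    intro cur
    rw [levelsOf]
    split
    · simpa using Nat.succ_le_succ (ih _)
    · simp

theorem levelsOf_getElem? (above : PySem.Dict Int Int) :
    ∀ (fuel : Nat) (cur : List (Option Int)) (j : Nat),
      j < (levelsOf above fuel cur).length →
      (levelsOf above fuel cur)[j]? =
        some (cur.map ((fun o : Option Int => o.bind above.get?)^[j])) := by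
  intro fuel
  induction fuel with
  | zero => intro cur j hj; simp [levelsOf] at hj
  | succ fuel ih =>
    intro cur j hj
    rw [levelsOf] at hj ⊢
    by_cases h : cur.any Option.isSome = true
    · rw [if_pos h] at hj ⊢
      cases j with
      | zero => simp
      | succ j =>
        have hj' : j < (levelsOf above fuel (cur.map (fun o => o.bind above.get?))).length := by
          simpa using hj
        have hstep : (cur :: levelsOf above fuel (cur.map (fun o => o.bind above.get?)))[j+1]? =
            (levelsOf above fuel (cur.map (fun o => o.bind above.get?)))[j]? := rfl
        rw [hstep, ih _ j hj', List.map_map, ← Function.iterate_succ]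
    · rw [if_neg h] at hj; simp at hj

theorem levelsOf_alive (above : PySem.Dict Int Int) :
    ∀ (fuel : Nat) (cur : List (Option Int)) (j : Nat),
      j < (levelsOf above fuel cur).length →
      (cur.map ((fun o : Option Int => o.bind above.get?)^[j])).any Option.isSome = true := by
  intro fuel
  induction fuel with
  | zero => intro cur j hj; simp [levelsOf] at hj
  | succ fuel ih =>
    intro cur j hj
    rw [levelsOf] at hj
    by_cases h : cur.any Option.isSome = true
    · rw [if_pos h] at hj
      cases j with
      | zero => simpa using h
      | succ j =>
        have hj' : j < (levelsOf above fuel (cur.map (fun o => o.bind above.get?))).length := by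
          simpa using hj
        have := ih (cur.map (fun o => o.bind above.get?)) j hj'
        rw [List.map_map, ← Function.iterate_succ] at this
        exact this
    · rw [if_neg h] at hj; simp at hj

theorem levelsOf_length_ge (above : PySem.Dict Int Int) :
    ∀ (fuel : Nat) (cur : List (Option Int)) (K : Nat), K ≤ fuel →
      (∀ j < K, (cur.map ((fun o : Option Int => o.bind above.get?)^[j])).any Option.isSome = true) →
      K ≤ (levelsOf above fuel cur).length := by
  intro fuel
  induction fuel with
  | zero => intro cur K hK _; omega
  | succ fuel ih =>
    intro cur K hK halive
    cases K with
    | zero => omega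
    | succ K =>
      rw [levelsOf]
      have h0 : cur.any Option.isSome = true := by
        have := halive 0 (by omega)
        simpa using this
      rw [if_pos h0]
      simp only [List.length_cons]
      have : K ≤ (levelsOf above fuel (cur.map (fun o => o.bind above.get?))).length := by
        refine ih _ K (by omega) ?_
        intro j hj
        have := halive (j+1) (by omega)
        rw [← this, List.map_map, ← Function.iterate_succ]
      omega

-- ---- width: A's max over len(str(b)) is len(str(n)) ----

theorem toDigitsCore_len (k : Nat) : ∀ (f : Nat) (l : List Char), k < f →
    (Nat.toDigitsCore 10 f k l).length = l.length + Nat.log 10 k + 1 := by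
  induction k using Nat.strong_induction_on with
  | _ k ih =>
    intro f l hkf
    match f with
    | f + 1 =>
      rw [Nat.toDigitsCore]
      by_cases h : k / 10 = 0
      · have hk10 : k < 10 := by omega
        have : Nat.log 10 k = 0 := Nat.log_eq_zero_iff.mpr (Or.inl hk10)
        simp [h, this]
      · have hk : 10 ≤ k := by
          by_contra hc
          exact h (Nat.div_eq_of_lt (by omega))
        have hlt : k / 10 < k := Nat.div_lt_self (by omega) (by omega)
        rw [if_neg h, ih (k / 10) hlt f _ (by omega)]
        have hlog : Nat.log 10 (k / 10) = Nat.log 10 k - 1 := Nat.log_div_base 10 k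
        have hpos : 0 < Nat.log 10 k := Nat.log_pos (by omega) hk
        simp only [List.length_cons]
        omega

theorem toChars_length_mono (a b : Int) (ha : 1 ≤ a) (hab : a ≤ b) :
    (PySem.Int.toChars a).length ≤ (PySem.Int.toChars b).length := by
  have h1 : ¬ a < 0 := by omega
  have h2 : ¬ b < 0 := by omega
  have key : ∀ k : Nat, (Nat.toDigits 10 k).length = Nat.log 10 k + 1 := fun k => by
    rw [Nat.toDigits, toDigitsCore_len k (k + 1) [] (by omega)]
    simp
  simp only [PySem.Int.toChars, if_neg h1, if_neg h2, key]
  exact Nat.succ_le_succ (Nat.log_mono_right (by omega))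

theorem width_eq (n : Nat) (hn : 1 ≤ n) :
    (PySem.List.max? ((PySem.List.pyRange 1 ((n : Int) + 1) 1).map
        (fun b => ((PySem.Int.toChars b).length : Int))) (fun x => x)).getD 0
      = ((PySem.Int.toChars (n : Int)).length : Int) := by
  have hne : (PySem.List.pyRange 1 ((n : Int) + 1) 1).map
      (fun b => ((PySem.Int.toChars b).length : Int)) ≠ [] := by
    simp [← List.length_eq_zero_iff, PySem.List.length_pyRange_one]
    omega
  cases hm : PySem.List.max? ((PySem.List.pyRange 1 ((n : Int) + 1) 1).map
      (fun b => ((PySem.Int.toChars b).length : Int))) (fun x => x) with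
  | none => exact absurd ((PySem.List.max?_eq_none_iff _ _).mp hm) hne
  | some m =>
    simp only [Option.getD_some]
    have hmem := PySem.List.max?_mem hm
    have hmax := PySem.List.max?_isMax hm
    rw [List.mem_map] at hmem
    obtain ⟨b, hb, rfl⟩ := hmem
    rw [PySem.List.mem_pyRange_one] at hb
    have hub : ((PySem.Int.toChars b).length : Int) ≤ ((PySem.Int.toChars (n : Int)).length : Int) := by
      exact_mod_cast toChars_length_mono b (n : Int) hb.1 (by omega)
    have hlb := hmax (((PySem.Int.toChars (n : Int)).length : Int)) (by
      rw [List.mem_map]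
      exact ⟨(n : Int), PySem.List.mem_pyRange_one.mpr ⟨by omega, by omega⟩, rfl⟩)
    omega

-- ---- A's countdown row fold as a reversed map over heights 0..H-1 ----

theorem rowsA_eq (towers : List (List Int)) (H : Int) (w : Nat) :
    (PySem.List.pyRange (H - 1) (-1) (-1)).foldl
      (fun rows height =>
        rows ++ [PySem.Chars.join [' ']
          (towers.foldl (fun row tower =>
            if (tower.length : Int) > height then
              row ++ [pyRjust (PySem.Int.toChars
                ((PySem.List.pyGet? tower height).getD 0)) w]
            else row ++ [List.replicate w ' ']) [])]) []
    = ((PySem.List.pyRange 0 H 1).map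
        (fun height => PySem.Chars.join [' ']
          (towers.map (fun tower =>
            if (tower.length : Int) > height then
              pyRjust (PySem.Int.toChars ((PySem.List.pyGet? tower height).getD 0)) w
            else List.replicate w ' ')))).reverse := by
  have hinner : ∀ height : Int,
      towers.foldl (fun row tower =>
        if (tower.length : Int) > height then
          row ++ [pyRjust (PySem.Int.toChars
            ((PySem.List.pyGet? tower height).getD 0)) w]
        else row ++ [List.replicate w ' ']) []
      = towers.map (fun tower =>
          if (tower.length : Int) > height then
            pyRjust (PySem.Int.toChars ((PySem.List.pyGet? tower height).getD 0)) w
          else List.replicate w ' ') := by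
    intro height
    have : (fun (row : List (List Char)) (tower : List Int) =>
        if (tower.length : Int) > height then
          row ++ [pyRjust (PySem.Int.toChars
            ((PySem.List.pyGet? tower height).getD 0)) w]
        else row ++ [List.replicate w ' '])
      = (fun row tower => row ++ [if (tower.length : Int) > height then
          pyRjust (PySem.Int.toChars ((PySem.List.pyGet? tower height).getD 0)) w
        else List.replicate w ' ']) := by
      funext row tower
      split <;> rfl
    rw [this, PySem.List.foldl_append_singleton_eq_map]
    rfl
  simp only [hinner]
  rw [PySem.List.foldl_append_singleton_eq_map
    (f := fun height => PySem.Chars.join [' ']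
      (towers.map (fun tower =>
        if (tower.length : Int) > height then
          pyRjust (PySem.Int.toChars ((PySem.List.pyGet? tower height).getD 0)) w
        else List.replicate w ' ')))]
  rw [List.nil_append]
  rw [PySem.List.pyRange_neg_one_eq_reverse]
  rw [show (-1 : Int) + 1 = 0 by ring, show H - 1 + 1 = H by ring]
  rw [List.map_reverse]

-- ===== VERDICT (by name: the statement is the Claim_ definition above) =====
theorem state_picture_spec : Claim_equal_state_picture := by
  intro bs hdom hpre
  unfold Spec_state_picture
  have hn : 0 < bs.length := List.length_pos_iff.mpr hpre
  simp only [state_picture, state_picture_alt]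
  have hnodup := PySem.List.nodup_pyRange_one 1 ((bs.length : Int) + 1)
  have hblocks : PySem.Set.ofList (PySem.List.pyRange 1 ((bs.length : Int) + 1) 1)
      = PySem.List.pyRange 1 ((bs.length : Int) + 1) 1 :=
    PySem.Set.ofList_eq_self_of_nodup _ hnodup
  rw [hblocks]
  rw [PySem.Set.ofList_eq_self_of_nodup _ (hnodup.filter _),
      PySem.Set.ofList_eq_self_of_nodup _ (hnodup.filter _)]
  rw [PySem.List.sorted_eq_self_of_pairwise _ _
    ((PySem.List.pairwise_lt_pyRange_one _ _).imp le_of_lt)]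
  -- A's towers loop is a map over the block range
  have hbody : (fun (ts : List (List Int)) (block : Int) =>
      if PySem.Set.contains (List.filter (fun b => PySem.List.pyGetD bs (b - 1) 0 == 0)
            (PySem.List.pyRange 1 ((bs.length : Int) + 1) 1)) block = true then
        ts ++ [towerLoopA (buildAbove bs)
          (List.filter (fun b => ((buildAbove bs).get? b).isNone)
            (PySem.List.pyRange 1 ((bs.length : Int) + 1) 1)) bs.length [block]]
      else ts ++ [[]])
      = fun ts block => ts ++
          [if PySem.Set.contains (List.filter (fun b => PySem.List.pyGetD bs (b - 1) 0 == 0)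
                (PySem.List.pyRange 1 ((bs.length : Int) + 1) 1)) block = true then
            towerLoopA (buildAbove bs)
              (List.filter (fun b => ((buildAbove bs).get? b).isNone)
                (PySem.List.pyRange 1 ((bs.length : Int) + 1) 1)) bs.length [block]
          else []] := by
    funext ts block
    split <;> rfl
  rw [hbody, PySem.List.foldl_append_singleton_eq_map
    (f := fun block =>
      if PySem.Set.contains (List.filter (fun b => PySem.List.pyGetD bs (b - 1) 0 == 0)
            (PySem.List.pyRange 1 ((bs.length : Int) + 1) 1)) block = true then
        towerLoopA (buildAbove bs)
          (List.filter (fun b => ((buildAbove bs).get? b).isNone)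
            (PySem.List.pyRange 1 ((bs.length : Int) + 1) 1)) bs.length [block]
      else [])
    (l := PySem.List.pyRange 1 ((bs.length : Int) + 1) 1) (acc := [])]
  simp only [List.nil_append]
  -- each tower is b :: chainTail (within fuel) for a table block b, else empty
  have hval := buildAbove_value_bounds bs
  have hclear : ∀ x : Int, 1 ≤ x → x ≤ (bs.length : Int) →
      (PySem.Set.contains (List.filter (fun b => ((buildAbove bs).get? b).isNone)
          (PySem.List.pyRange 1 ((bs.length : Int) + 1) 1)) x = true
        ↔ ((buildAbove bs).get? x).isNone = true) := by
    intro x h1 h2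
    rw [PySem.Set.contains_iff]
    constructor
    · intro hmem; exact (List.mem_filter.mp hmem).2
    · intro hnone
      exact List.mem_filter.mpr ⟨PySem.List.mem_pyRange_one.mpr ⟨h1, by omega⟩, hnone⟩
  have htow : (PySem.List.pyRange 1 ((bs.length : Int) + 1) 1).map
      (fun block =>
        if PySem.Set.contains (List.filter (fun b => PySem.List.pyGetD bs (b - 1) 0 == 0)
              (PySem.List.pyRange 1 ((bs.length : Int) + 1) 1)) block = true then
          towerLoopA (buildAbove bs)
            (List.filter (fun b => ((buildAbove bs).get? b).isNone)
              (PySem.List.pyRange 1 ((bs.length : Int) + 1) 1)) bs.length [block]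
        else [])
      = (PySem.List.pyRange 1 ((bs.length : Int) + 1) 1).map
        (fun b => if PySem.List.pyGetD bs (b - 1) 0 == 0
                  then b :: chainTail (buildAbove bs) bs.length b else []) := by
    apply List.map_congr_left
    intro b hb
    rw [PySem.List.mem_pyRange_one] at hb
    have hcont : PySem.Set.contains (List.filter
        (fun b => PySem.List.pyGetD bs (b - 1) 0 == 0)
        (PySem.List.pyRange 1 ((bs.length : Int) + 1) 1)) b
        = (PySem.List.pyGetD bs (b - 1) 0 == 0) := by
      cases hpb : (PySem.List.pyGetD bs (b - 1) 0 == 0) with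
      | true =>
        rw [PySem.Set.contains_iff]
        exact List.mem_filter.mpr ⟨PySem.List.mem_pyRange_one.mpr hb, hpb⟩
      | false =>
        rw [← Bool.not_eq_true, PySem.Set.contains_iff]
        intro hmem
        rw [(List.mem_filter.mp hmem).2] at hpb
        exact Bool.true_eq_false.mp hpb
    rw [hcont]
    by_cases hpb : (PySem.List.pyGetD bs (b - 1) 0 == 0) = true
    · rw [if_pos hpb, if_pos hpb]
      have hne : ([b] : List Int) ≠ [] := by simp
      rw [towerLoopA_chain (buildAbove bs) _ (bs.length : Int) hclear hval bs.length [b] hne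
        (by intro x hx; rw [List.mem_singleton] at hx; subst hx; exact ⟨hb.1, by omega⟩)]
      simp
    · rw [if_neg hpb, if_neg hpb]
  rw [htow]
  -- the label width A computes by a max is the width of the largest label n
  rw [width_eq bs.length hn]
  simp only [Int.toNat_natCast]
  -- column facts: each tower's entry at height h is the h-th iterate of the successor map
  have hcol : ∀ b : Int, ∀ h : Nat, h ≤ bs.length →
      ((if PySem.List.pyGetD bs (b - 1) 0 == 0
        then b :: chainTail (buildAbove bs) bs.length b else []) : List Int)[h]? =
      (fun o : Option Int => o.bind (buildAbove bs).get?)^[h]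
        (if PySem.List.pyGetD bs (b - 1) 0 == 0 then some b else none) := by
    intro b h hh
    by_cases hpb : (PySem.List.pyGetD bs (b - 1) 0 == 0) = true
    · rw [if_pos hpb, if_pos hpb, chain_getElem? (buildAbove bs) h bs.length b hh]
    · rw [if_neg hpb, if_neg hpb, step1_iterate_none]
      simp
  have hlenle : ∀ b : Int,
      ((if PySem.List.pyGetD bs (b - 1) 0 == 0
        then b :: chainTail (buildAbove bs) bs.length b else []) : List Int).length
        ≤ bs.length + 1 := by
    intro b
    split
    · simpa using Nat.succ_le_succ (chainTail_length_le (buildAbove bs) bs.length b)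
    · simp
  -- name A's max_height
  cases hm : PySem.List.max?
      (((PySem.List.pyRange 1 ((bs.length : Int) + 1) 1).map
        (fun b => if PySem.List.pyGetD bs (b - 1) 0 == 0
                  then b :: chainTail (buildAbove bs) bs.length b else [])).map
        (fun t => (t.length : Int))) (fun x => x) with
  | none =>
    exfalso
    have := (PySem.List.max?_eq_none_iff _ _).mp hm
    rw [List.map_eq_nil_iff, List.map_eq_nil_iff, ← List.length_eq_zero_iff,
      PySem.List.length_pyRange_one] at this
    omega
  | some m =>
    simp only [Option.getD_some]
    have hmax := PySem.List.max?_isMax hm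
    have hmemm := PySem.List.max?_mem hm
    rw [List.mem_map] at hmemm
    obtain ⟨t0, ht0, hmt0⟩ := hmemm
    rw [List.mem_map] at ht0
    obtain ⟨b0, hb0, rfl⟩ := ht0
    have hm0 : 0 ≤ m := by omega
    have hmn1 : m ≤ (bs.length : Int) + 1 := by
      rw [← hmt0]
      exact_mod_cast hlenle b0
    -- B's level list has exactly max_height rows
    have hL : (((levelsOf (buildAbove bs) (bs.length + 1)
        ((PySem.List.pyRange 1 ((bs.length : Int) + 1) 1).map
          (fun b => if PySem.List.pyGetD bs (b - 1) 0 == 0 then some b else none))).length : Int))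
        = m := by
      have hLle := levelsOf_length_le (buildAbove bs) (bs.length + 1)
        ((PySem.List.pyRange 1 ((bs.length : Int) + 1) 1).map
          (fun b => if PySem.List.pyGetD bs (b - 1) 0 == 0 then some b else none))
      have hub : ((levelsOf (buildAbove bs) (bs.length + 1)
          ((PySem.List.pyRange 1 ((bs.length : Int) + 1) 1).map
            (fun b => if PySem.List.pyGetD bs (b - 1) 0 == 0 then some b else none))).length : Int) ≤ m := by
        set L := (levelsOf (buildAbove bs) (bs.length + 1)
          ((PySem.List.pyRange 1 ((bs.length : Int) + 1) 1).map
            (fun b => if PySem.List.pyGetD bs (b - 1) 0 == 0 then some b else none))).length with hLdef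
        rcases Nat.eq_zero_or_pos L with h0 | hLpos
        · omega
        · have hj : L - 1 < L := by omega
          have halive := levelsOf_alive (buildAbove bs) (bs.length + 1) _ (L - 1) hj
          rw [List.any_eq_true] at halive
          obtain ⟨o, ho, hos⟩ := halive
          rw [List.map_map, List.mem_map] at ho
          obtain ⟨b, hbmem, rfl⟩ := ho
          have hjn : L - 1 ≤ bs.length := by omega
          have := hcol b (L - 1) hjn
          have hsome : ((if PySem.List.pyGetD bs (b - 1) 0 == 0
              then b :: chainTail (buildAbove bs) bs.length b else []) : List Int)[L-1]?.isSome = true := by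
            rw [this]; exact hos
          rw [isSome_getElem?] at hsome
          have hle := hmax (((if PySem.List.pyGetD bs (b - 1) 0 == 0
              then b :: chainTail (buildAbove bs) bs.length b else []) : List Int).length : Int)
            (by
              rw [List.mem_map]
              exact ⟨_, List.mem_map_of_mem hbmem, rfl⟩)
          omega
      have hlb : m.toNat ≤ (levelsOf (buildAbove bs) (bs.length + 1)
          ((PySem.List.pyRange 1 ((bs.length : Int) + 1) 1).map
            (fun b => if PySem.List.pyGetD bs (b - 1) 0 == 0 then some b else none))).length := by
        refine levelsOf_length_ge (buildAbove bs) (bs.length + 1) _ m.toNat (by omega) ?_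
        intro j hj
        rw [List.map_map, List.any_eq_true]
        refine ⟨_, List.mem_map_of_mem hb0, ?_⟩
        have hjn : j ≤ bs.length := by omega
        have hcb := hcol b0 j hjn
        have hjlt : j < ((if PySem.List.pyGetD bs (b0 - 1) 0 == 0
            then b0 :: chainTail (buildAbove bs) bs.length b0 else []) : List Int).length := by
          omega
        have hs : ((if PySem.List.pyGetD bs (b0 - 1) 0 == 0
            then b0 :: chainTail (buildAbove bs) bs.length b0 else []) : List Int)[j]?.isSome = true := by
          rw [isSome_getElem?]; exact hjlt
        rw [hcb] at hs
        exact hs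
      omega
    -- A's row fold is the reverse of the rows by increasing height
    rw [rowsA_eq]
    -- B's sweep appends one rendered row per level
    rw [levelLoopB_eq, List.nil_append]
    -- the two row lists coincide
    have hrows : (PySem.List.pyRange 0 m 1).map
        (fun height => PySem.Chars.join [' ']
          (((PySem.List.pyRange 1 ((bs.length : Int) + 1) 1).map
            (fun b => if PySem.List.pyGetD bs (b - 1) 0 == 0
                      then b :: chainTail (buildAbove bs) bs.length b else [])).map
            (fun tower =>
              if (tower.length : Int) > height then
                pyRjust (PySem.Int.toChars ((PySem.List.pyGet? tower height).getD 0))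
                  (PySem.Int.toChars (bs.length : Int)).length
              else List.replicate (PySem.Int.toChars (bs.length : Int)).length ' ')))
        = (levelsOf (buildAbove bs) (bs.length + 1)
            ((PySem.List.pyRange 1 ((bs.length : Int) + 1) 1).map
              (fun b => if PySem.List.pyGetD bs (b - 1) 0 == 0 then some b else none))).map
          (fun lv => PySem.Chars.join [' ']
            (lv.map (cellB (PySem.Int.toChars (bs.length : Int)).length))) := by
      apply List.ext_getElem
      · rw [List.length_map, List.length_map, PySem.List.length_pyRange_one]
        omega
      · intro i h1 h2
        rw [List.length_map, PySem.List.length_pyRange_one] at h1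
        simp only [List.getElem_map]
        rw [PySem.List.getElem_pyRange_one]
        have hlv : (levelsOf (buildAbove bs) (bs.length + 1)
            ((PySem.List.pyRange 1 ((bs.length : Int) + 1) 1).map
              (fun b => if PySem.List.pyGetD bs (b - 1) 0 == 0 then some b else none)))[i]
            = ((PySem.List.pyRange 1 ((bs.length : Int) + 1) 1).map
                (fun b => if PySem.List.pyGetD bs (b - 1) 0 == 0 then some b else none)).map
                ((fun o : Option Int => o.bind (buildAbove bs).get?)^[i]) := by
          have h2' : i < (levelsOf (buildAbove bs) (bs.length + 1)
              ((PySem.List.pyRange 1 ((bs.length : Int) + 1) 1).map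
                (fun b => if PySem.List.pyGetD bs (b - 1) 0 == 0 then some b else none))).length := by
            simpa using h2
          have := levelsOf_getElem? (buildAbove bs) (bs.length + 1) _ i h2'
          rw [List.getElem?_eq_getElem h2'] at this
          exact Option.some_injective _ this
        rw [hlv]
        congr 1
        rw [List.map_map, List.map_map, List.map_map]
        apply List.map_congr_left
        intro b hbmem
        simp only [Function.comp_apply]
        have hin : i ≤ bs.length := by omega
        have hcb := hcol b i hin
        rw [zero_add]
        cases hiter : (fun o : Option Int => o.bind (buildAbove bs).get?)^[i]
            (if PySem.List.pyGetD bs (b - 1) 0 == 0 then some b else none) with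
        | some v =>
          rw [hiter] at hcb
          obtain ⟨hlt, -⟩ := List.getElem?_eq_some_iff.mp hcb
          rw [if_pos (by exact_mod_cast hlt)]
          rw [PySem.List.pyGet?_natCast, hcb]
          rfl
        | none =>
          rw [hiter] at hcb
          have hge' := List.getElem?_eq_none_iff.mp hcb
          have hge : ¬ i < ((if PySem.List.pyGetD bs (b - 1) 0 == 0
              then b :: chainTail (buildAbove bs) bs.length b else []) : List Int).length := by
            omega
          rw [if_neg (by exact_mod_cast hge)]
          rfl
    rw [hrows]
    -- the dash lines coincide
    have hlen : ((PySem.List.pyRange 1 ((bs.length : Int) + 1) 1).map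
        (fun b => if PySem.List.pyGetD bs (b - 1) 0 == 0
                  then b :: chainTail (buildAbove bs) bs.length b else [])).length
        = bs.length := by
      rw [List.length_map, PySem.List.length_pyRange_one]
      omega
    rw [hlen]
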